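-- pv_equiv track=rewrite | github.com/FumiHubCNS/samidare-lib | src/samidare_lib/core/decode_v0.py | format_2byte_groups_colorized_from_pairs
-- ===== SOURCE A (Python) =====
-- def format_2byte_groups_colorized_from_pairs(pairs, colors, reset="\x1b[0m", last_byte_color=None):
--     """ペアからバイトを抽出し、2バイトグループで色付けしてフォーマットする。
--
--     Args:
--         pairs: (位置, バイト)ペアのリスト
--         colors: {2バイト16進数: ANSIカラーコード} の辞書
--         reset: リセット用ANSIコード（デフォルト: "\\x1b[0m"）
--         last_byte_color: 奇数バイト末尾用のANSIコード
--
--     Returns: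
--         色付きの16進数文字列（スペース区切り）
--     """
--     bs = bytes(b for _, b in pairs)
--     out = []
--     i = 0
--     n = len(bs)
--     while i + 1 < n:
--         token = f"{bs[i]:02x}{bs[i+1]:02x}"
--         c = colors.get(token.lower())
--         out.append(f"{c}{token}{reset}" if c else token)
--         i += 2
--     if i < n:
--         last = f"{bs[i]:02x}"
--         out.append(f"{last_byte_color}{last}{reset}" if last_byte_color else last)
--     return " ".join(out)
-- ===== SOURCE B (Python) =====
-- def format_2byte_groups_colorized_from_pairs(pairs, colors, reset="\x1b[0m", last_byte_color=None):
--     rest = "".join(f"{b:02x}" for b in bytes(b for _, b in pairs))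
--     parts = []
--     while rest:
--         token, rest = rest[:4], rest[4:]
--         if len(token) == 4:
--             c = colors.get(token)
--             parts.append(f"{c}{token}{reset}" if c else token)
--         else:
--             parts.append(f"{last_byte_color}{token}{reset}" if last_byte_color else token)
--     return " ".join(parts)
-- ===== Notes on version B (the rewrite author's own statement) =====
-- stated objective: idiomatic
-- what changed: B builds the whole hex string once with a join and then walks it in 4-character slices (trailing 2-character slice = odd byte), instead of A's index-stepping while loop over the byte array that formats each 2-byte token on the fly.
import Mathlib
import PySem

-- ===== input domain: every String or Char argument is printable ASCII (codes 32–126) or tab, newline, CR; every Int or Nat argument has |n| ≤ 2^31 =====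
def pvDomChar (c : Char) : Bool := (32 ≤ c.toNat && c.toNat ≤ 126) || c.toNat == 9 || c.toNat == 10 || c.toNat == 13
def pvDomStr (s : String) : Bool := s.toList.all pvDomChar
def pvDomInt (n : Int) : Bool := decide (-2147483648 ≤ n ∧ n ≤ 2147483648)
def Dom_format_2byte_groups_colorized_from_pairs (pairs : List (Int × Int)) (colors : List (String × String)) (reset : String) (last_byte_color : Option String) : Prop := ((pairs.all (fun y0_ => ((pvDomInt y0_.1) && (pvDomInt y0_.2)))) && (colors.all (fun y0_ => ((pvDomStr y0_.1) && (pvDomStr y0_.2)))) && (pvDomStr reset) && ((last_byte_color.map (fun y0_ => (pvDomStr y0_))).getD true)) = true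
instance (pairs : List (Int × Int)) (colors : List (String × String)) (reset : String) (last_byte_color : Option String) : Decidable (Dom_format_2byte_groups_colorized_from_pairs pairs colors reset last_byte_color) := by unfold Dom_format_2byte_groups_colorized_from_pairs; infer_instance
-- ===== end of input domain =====

-- ===== PORT A =====
-- B restates A's hex-grouping as one joined hex string walked in 4-char slices (idiomatic decomposition; same cost).
-- Pre_ excludes inputs on which Python A raises ValueError (a byte outside 0..255 in bytes(...)).

-- f"{b:02x}" for 0 <= b <= 255 (the Pre_ domain): two lowercase hex digits; exact there.
def pvHexDigit (n : Int) : Char := ("0123456789abcdef".toList).getD n.toNat '0'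
def pvHex2 (b : Int) : List Char := [pvHexDigit (PySem.Int.floordiv b 16), pvHexDigit (PySem.Int.mod b 16)]

-- f"{c}{token}{reset}" if c else token  (Python truthiness: None and "" are falsy)
def pvPaint (c : Option String) (token reset : String) : String :=
  match c with
  | some s => if s = "" then token else s ++ token ++ reset
  | none => token

-- dict.get on the association list (first match)
def pvGetColor (colors : List (String × String)) (k : String) : Option String :=
  (colors.find? (fun p => p.1 == k)).map (·.2)

-- A's while loop: i steps by 2 over bs; ported as two-at-a-time structural recursion.
def pvLoopA (colors : List (String × String)) (reset : String) (lbc : Option String) : List Int → List String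
  | b0 :: b1 :: rest =>
      let token := String.ofList (pvHex2 b0 ++ pvHex2 b1)
      pvPaint (pvGetColor colors (PySem.Str.lower token)) token reset :: pvLoopA colors reset lbc rest
  | [b0] =>
      let last := String.ofList (pvHex2 b0)
      [pvPaint lbc last reset]
  | [] => []

def format_2byte_groups_colorized_from_pairs (pairs : List (Int × Int)) (colors : List (String × String)) (reset : String) (last_byte_color : Option String) : String :=
  let bs := pairs.map (·.2)
  PySem.Str.join " " (pvLoopA colors reset last_byte_color bs)

-- ===== PORT B =====
-- Source B's while loop: peel rest[:4] / rest[4:] off the joined hex string until empty.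
def pvChunkB (colors : List (String × String)) (reset : String) (lbc : Option String) : List Char → List String
  | [] => []
  | c :: cs =>
      let token := PySem.List.slice (c :: cs) none (some 4)
      let rest := PySem.List.slice (c :: cs) (some 4) none
      (if token.length == 4 then
        pvPaint (pvGetColor colors (String.ofList token)) (String.ofList token) reset
      else
        pvPaint lbc (String.ofList token) reset) :: pvChunkB colors reset lbc rest
  termination_by h => h.length
  decreasing_by
    rw [PySem.List.slice_from _ (by norm_num)]
    simp

def format_2byte_groups_colorized_from_pairs_alt (pairs : List (Int × Int)) (colors : List (String × String)) (reset : String) (last_byte_color : Option String) : String :=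
  let h := (pairs.map (·.2)).flatMap pvHex2
  PySem.Str.join " " (pvChunkB colors reset last_byte_color h)

-- ===== PRECONDITION & SPEC =====
-- Pre_: exactly the inputs on which Python A returns (bytes(...) raises ValueError for a byte outside 0..255).
def Pre_format_2byte_groups_colorized_from_pairs (pairs : List (Int × Int)) (colors : List (String × String)) (reset : String) (last_byte_color : Option String) : Prop :=
  ∀ p ∈ pairs, 0 ≤ p.2 ∧ p.2 < 256
instance (pairs : List (Int × Int)) (colors : List (String × String)) (reset : String) (last_byte_color : Option String) : Decidable (Pre_format_2byte_groups_colorized_from_pairs pairs colors reset last_byte_color) := by unfold Pre_format_2byte_groups_colorized_from_pairs; infer_instance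

def pvWitness_format_2byte_groups_colorized_from_pairs : (List (Int × Int)) × (List (String × String)) × String × Option String :=
  ([(0, 171), (1, 205), (2, 1)], [("abcd", "[R]")], "[/]", some "[Y]")

def Spec_format_2byte_groups_colorized_from_pairs (pairs : List (Int × Int)) (colors : List (String × String)) (reset : String) (last_byte_color : Option String) (out : String) : Prop := out = format_2byte_groups_colorized_from_pairs_alt pairs colors reset last_byte_color
instance (pairs : List (Int × Int)) (colors : List (String × String)) (reset : String) (last_byte_color : Option String) (out : String) : Decidable (Spec_format_2byte_groups_colorized_from_pairs pairs colors reset last_byte_color out) := by unfold Spec_format_2byte_groups_colorized_from_pairs; infer_instance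

-- ===== CLAIM (what is proved, stated in full; the proofs are below) =====
def Claim_equal_format_2byte_groups_colorized_from_pairs : Prop := ∀ (pairs : List (Int × Int)) (colors : List (String × String)) (reset : String) (last_byte_color : Option String), Dom_format_2byte_groups_colorized_from_pairs pairs colors reset last_byte_color → Pre_format_2byte_groups_colorized_from_pairs pairs colors reset last_byte_color → Spec_format_2byte_groups_colorized_from_pairs pairs colors reset last_byte_color (format_2byte_groups_colorized_from_pairs pairs colors reset last_byte_color)

-- ===== LEMMAS AND PROOFS =====

lemma pvHexDigit_lower (n : Int) : PySem.Chars.lowerChar (pvHexDigit n) = pvHexDigit n := by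
  unfold pvHexDigit
  by_cases h : n.toNat < 16
  · interval_cases h' : n.toNat <;> decide
  · rw [List.getD_eq_default]
    · decide
    · simpa using Nat.le_of_not_lt h

lemma pvLower_hex4 (b0 b1 : Int) :
    PySem.Str.lower (String.ofList (pvHex2 b0 ++ pvHex2 b1)) = String.ofList (pvHex2 b0 ++ pvHex2 b1) := by
  apply String.ext
  rw [PySem.Str.toList_lower]
  simp [PySem.Chars.lower, pvHex2, pvHexDigit_lower]

lemma pvSlice_to_four {a b c d : Char} {t : List Char} :
    PySem.List.slice (a :: b :: c :: d :: t) none (some 4) = [a, b, c, d] := by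
  rw [PySem.List.slice_to _ (by norm_num)]; rfl

lemma pvSlice_from_four {a b c d : Char} {t : List Char} :
    PySem.List.slice (a :: b :: c :: d :: t) (some 4) none = t := by
  rw [PySem.List.slice_from _ (by norm_num)]; rfl

lemma pvSlice_to_two {a b : Char} : PySem.List.slice [a, b] none (some 4) = [a, b] := by
  rw [PySem.List.slice_to _ (by norm_num)]; rfl

lemma pvSlice_from_two {a b : Char} : PySem.List.slice [a, b] (some 4) none = ([] : List Char) := by
  rw [PySem.List.slice_from _ (by norm_num)]; rfl

lemma pvChunk_eq_loop (colors : List (String × String)) (reset : String) (lbc : Option String) :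
    ∀ bs : List Int, pvChunkB colors reset lbc (bs.flatMap pvHex2) = pvLoopA colors reset lbc bs := by
  intro bs
  induction bs using pvLoopA.induct with
  | case1 b0 b1 rest ih =>
      show pvChunkB colors reset lbc (pvHex2 b0 ++ (pvHex2 b1 ++ rest.flatMap pvHex2)) = _
      simp only [pvHex2, List.cons_append, List.nil_append]
      rw [pvChunkB, pvLoopA]
      simp only [pvSlice_to_four, pvSlice_from_four, ih]
      rw [pvLower_hex4]
      simp [pvHex2]
  | case2 b0 =>
      show pvChunkB colors reset lbc (pvHex2 b0 ++ []) = _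
      simp only [pvHex2, List.append_nil]
      rw [pvChunkB, pvLoopA]
      simp only [pvSlice_to_two, pvSlice_from_two]
      rw [pvChunkB]
      simp [pvHex2]
  | case3 =>
      show pvChunkB colors reset lbc [] = _
      rw [pvChunkB, pvLoopA]

-- ===== VERDICT (by name: the statement is the Claim_ definition above) =====
theorem format_2byte_groups_colorized_from_pairs_spec : Claim_equal_format_2byte_groups_colorized_from_pairs := by
  intro pairs colors reset lbc _ _
  unfold Spec_format_2byte_groups_colorized_from_pairs
  show PySem.Str.join " " (pvLoopA colors reset lbc (pairs.map (·.2))) =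
      PySem.Str.join " " (pvChunkB colors reset lbc ((pairs.map (·.2)).flatMap pvHex2))
  rw [pvChunk_eq_loop]
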